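-- pv_equiv track=rewrite | github.com/natallieoppenheimer-code/websites | clawbot/integrations/lead_gen/bizfile.py | _pick_name
-- ===== SOURCE A (Python) =====
-- def _pick_name(item: dict) -> str:
--     """Extract a person name from an agent/officer dict."""
--     # Explicit full-name field
--     for k in ("NAME", "AGENT_NAME", "FULL_NAME"):
--         v = str(item.get(k) or "").strip()
--         if v and _looks_like_name(v):
--             return v.title()
--     # First + Last
--     first = str(item.get("FIRST_NAME") or "").strip()
--     last  = str(item.get("LAST_NAME")  or "").strip()
--     if first or last:
--         name = f"{first} {last}".strip()
--         if _looks_like_name(name):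
--             return name.title()
--     return ""
--
-- def _looks_like_name(text: str) -> bool:
--     if not text or len(text) < 3 or len(text) > 60:
--         return False
--     words = text.split()
--     if not (1 <= len(words) <= 5):
--         return False
--     if any(ch.isdigit() for ch in text):
--         return False
--     SKIP = {"true","false","null","none","ca","llc","inc","corp","ltd","co","the",
--             "and","agent","registered","authorized","employee","principal","officer",
--             "member","manager","active","inactive","suspended","dissolved"}
--     if text.strip().lower() in SKIP:
--         return False
--     return sum(1 for w in words if w.replace(".","").replace(",","").isalpha()) >= 1
-- ===== SOURCE B (Python) =====
-- _FIELDS = ("NAME", "AGENT_NAME", "FULL_NAME", "FIRST_NAME", "LAST_NAME")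
--
-- def _pick_name(item: dict) -> str:
--     """Extract a person name from an agent/officer dict."""
--     # single pass over the dict collecting the relevant fields (first occurrence wins)
--     slots = {}
--     for k, v in item.items():
--         if k in _FIELDS and k not in slots:
--             slots[k] = str(v or "").strip()
--     g = lambda k: slots.get(k, "")
--     combined = (g("FIRST_NAME") + " " + g("LAST_NAME")).strip()
--     # back-to-front pass: each acceptable candidate overwrites, so the
--     # highest-priority acceptable candidate is what remains
--     result = ""
--     for c in (combined, g("FULL_NAME"), g("AGENT_NAME"), g("NAME")):
--         if c and _looks_like_name(c):
--             result = c.title()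
--     return result
--
-- _SKIP = {"true","false","null","none","ca","llc","inc","corp","ltd","co","the",
--          "and","agent","registered","authorized","employee","principal","officer",
--          "member","manager","active","inactive","suspended","dissolved"}
--
-- def _looks_like_name(text: str) -> bool:
--     words = text.split()
--     return (3 <= len(text) <= 60
--             and 1 <= len(words) <= 5
--             and not any(ch.isdigit() for ch in text)
--             and text.strip().lower() not in _SKIP
--             and any(w.replace(".", "").replace(",", "").isalpha() for w in words))
-- ===== Notes on version B (the rewrite author's own statement) =====
-- stated objective: alternative
-- what changed: B replaces A's repeated per-key dict lookups and two-stage early-return cascade with a single pass over the dict collecting the five relevant fields into a slot table, then a back-to-front overwrite fold over the four candidates (so the highest-priority acceptable candidate survives), and restates the validity predicate as one conjunction using any() instead of a guarded count.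
import Mathlib
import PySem

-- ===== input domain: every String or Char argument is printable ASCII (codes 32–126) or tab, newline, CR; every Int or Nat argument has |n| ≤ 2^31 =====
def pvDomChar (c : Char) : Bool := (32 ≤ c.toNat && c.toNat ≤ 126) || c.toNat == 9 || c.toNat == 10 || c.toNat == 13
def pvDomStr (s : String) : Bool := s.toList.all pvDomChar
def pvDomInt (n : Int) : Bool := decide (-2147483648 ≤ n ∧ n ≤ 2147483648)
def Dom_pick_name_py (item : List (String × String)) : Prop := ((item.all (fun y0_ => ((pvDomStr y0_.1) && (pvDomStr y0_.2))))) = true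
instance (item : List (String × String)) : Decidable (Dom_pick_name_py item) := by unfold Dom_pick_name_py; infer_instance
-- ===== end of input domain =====

-- B is an alternative decomposition: one pass over the dict collects the relevant
-- fields into a slot table, a back-to-front overwrite fold replaces the early-return
-- cascade, and the validity predicate is one conjunction instead of guard chains.

-- `str(item.get(k) or "")` : first-match association lookup, missing/empty → ""
def getS (item : List (String × String)) (k : String) : String :=
  match item.find? (fun p => p.1 == k) with
  | some p => p.2
  | none => ""

-- str.title() ported by hand (no PySem primitive); exact on the ASCII domain:
-- a letter following a non-letter is uppercased, one following a letter is lowercased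
def titleGo : List Char → Bool → List Char
  | [], _ => []
  | c :: rest, prevAlpha =>
    if PySem.Chars.isalpha c then
      (if prevAlpha then PySem.Chars.lowerChar c else PySem.Chars.upperChar c) :: titleGo rest true
    else
      c :: titleGo rest false

def pyTitle (s : String) : String := String.ofList (titleGo s.toList false)

def SKIP : List String :=
  ["true","false","null","none","ca","llc","inc","corp","ltd","co","the",
   "and","agent","registered","authorized","employee","principal","officer",
   "member","manager","active","inactive","suspended","dissolved"]

-- ===== PORT A =====
def looks_like_name_py (text : String) : Bool :=
  if text = "" ∨ PySem.Str.len text < 3 ∨ PySem.Str.len text > 60 then false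
  else
    let words := PySem.Str.split₀ text
    if ¬ (1 ≤ words.length ∧ words.length ≤ 5) then false
    else if text.toList.any PySem.Chars.isdigit then false
    else if SKIP.contains (PySem.Str.lower (PySem.Str.strip text)) then false
    else decide (1 ≤ (words.filter
      (fun w => PySem.Str.strIsalpha (PySem.Str.replace (PySem.Str.replace w "." "") "," ""))).length)

def pickA_loop (item : List (String × String)) : List String → Option String
  | [] => none
  | k :: ks =>
    let v := PySem.Str.strip (getS item k)
    if v ≠ "" ∧ looks_like_name_py v = true then some (pyTitle v)
    else pickA_loop item ks

def pick_name_py (item : List (String × String)) : String :=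
  match pickA_loop item ["NAME", "AGENT_NAME", "FULL_NAME"] with
  | some r => r
  | none =>
    let first := PySem.Str.strip (getS item "FIRST_NAME")
    let last := PySem.Str.strip (getS item "LAST_NAME")
    if first ≠ "" ∨ last ≠ "" then
      let name := PySem.Str.strip (first ++ " " ++ last)
      if looks_like_name_py name then pyTitle name else ""
    else ""

-- ===== PORT B =====
-- B's validity test: the same five conditions as one conjunction, `any` instead of a count
def looks_like_name_alt (text : String) : Bool :=
  let words := PySem.Str.split₀ text
  decide (3 ≤ PySem.Str.len text) && decide (PySem.Str.len text ≤ 60)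
  && decide (1 ≤ words.length) && decide (words.length ≤ 5)
  && !(text.toList.any PySem.Chars.isdigit)
  && !(SKIP.contains (PySem.Str.lower (PySem.Str.strip text)))
  && words.any (fun w => PySem.Str.strIsalpha (PySem.Str.replace (PySem.Str.replace w "." "") "," ""))

def FIELDS : List String := ["NAME", "AGENT_NAME", "FULL_NAME", "FIRST_NAME", "LAST_NAME"]

-- one pass over the dict: first occurrence of each relevant key, stripped
def slotStep (d : PySem.Dict String String) (kv : String × String) : PySem.Dict String String :=
  if FIELDS.contains kv.1 && !(d.contains kv.1)
  then d.insert kv.1 (PySem.Str.strip kv.2) else d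

def collectSlots (item : List (String × String)) : PySem.Dict String String :=
  item.foldl slotStep PySem.Dict.empty

-- back-to-front pass: each acceptable candidate overwrites the accumulator
def pickB_loop : List String → String → String
  | [], res => res
  | c :: rest, res =>
    pickB_loop rest (if c != "" && looks_like_name_alt c then pyTitle c else res)

def pick_name_py_alt (item : List (String × String)) : String :=
  let slots := collectSlots item
  let g := fun k => slots.getD k ""
  let combined := PySem.Str.strip (g "FIRST_NAME" ++ " " ++ g "LAST_NAME")
  pickB_loop [combined, g "FULL_NAME", g "AGENT_NAME", g "NAME"] ""

-- ===== PRECONDITION & SPEC =====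
def Spec_pick_name_py (item : List (String × String)) (out : String) : Prop := out = pick_name_py_alt item
instance (item : List (String × String)) (out : String) : Decidable (Spec_pick_name_py item out) := by unfold Spec_pick_name_py; infer_instance

-- ===== CLAIM (what is proved, stated in full; the proofs are below) =====
def Claim_equal_pick_name_py : Prop := ∀ (item : List (String × String)), Dom_pick_name_py item → Spec_pick_name_py item (pick_name_py item)

-- ===== LEMMAS AND PROOFS =====

-- B's slot pass reproduces the per-key first-match lookup of A
theorem collect_get (k : String) :
    ∀ (l : List (String × String)) (d : PySem.Dict String String),
      FIELDS.contains k = true →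
      (l.foldl slotStep d).get? k =
        ((d.get? k).orElse (fun _ =>
          (l.find? (fun p => p.1 == k)).map (fun p => PySem.Str.strip p.2)))
  | [], d, _ => by cases h : d.get? k <;> simp [Option.orElse, h]
  | (a, b) :: t, d, hk => by
    simp only [List.foldl_cons, List.find?]
    by_cases hak : a = k
    · subst hak
      cases hd : d.get? a with
      | some v =>
        have hc : d.contains a = true := by
          rw [PySem.Dict.contains_eq_isSome_get?, hd]; rfl
        have hstep : slotStep d (a, b) = d := by
          unfold slotStep; simp [hc]
        rw [hstep, collect_get a t d hk]
        simp [Option.orElse, hd]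
      | none =>
        have hc : d.contains a = false := by
          rw [PySem.Dict.contains_eq_isSome_get?, hd]; rfl
        have hstep : slotStep d (a, b) = d.insert a (PySem.Str.strip b) := by
          unfold slotStep
          have hg : (FIELDS.contains a && !(d.contains a)) = true := by
            rw [hk, hc]; rfl
          simp only [hg, if_true]
        rw [hstep, collect_get a t _ hk]
        simp [Option.orElse, PySem.Dict.get?_insert_self]
    · have hne : (a == k) = false := by simp [hak]
      have hget : (slotStep d (a, b)).get? k = d.get? k := by
        unfold slotStep
        split
        · exact PySem.Dict.get?_insert_of_ne _ _ (fun h => hak h.symm)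
        · rfl
      rw [collect_get k t _ hk, hget]
      simp [hne]

theorem collect_getD (item : List (String × String)) (k : String)
    (hk : FIELDS.contains k = true) :
    (collectSlots item).getD k "" = PySem.Str.strip (getS item k) := by
  rw [PySem.Dict.getD_eq_get?_getD, collectSlots, collect_get k item _ hk]
  simp only [PySem.Dict.get?_empty, Option.orElse]
  unfold getS
  cases h : item.find? (fun p => p.1 == k) <;> simp [h] <;> decide

-- a filtered sublist is nonempty iff some element passes: bridges A's count to B's any
theorem one_le_filter_eq_any {α : Type} (l : List α) (p : α → Bool) :
    decide (1 ≤ (l.filter p).length) = l.any p := by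
  by_cases h : l.any p = true
  · rw [h, decide_eq_true_iff]
    obtain ⟨x, hx, hp⟩ := List.any_eq_true.mp h
    have hm : x ∈ l.filter p := List.mem_filter.mpr ⟨hx, hp⟩
    have := List.length_pos_of_mem hm
    omega
  · have h' : l.any p = false := eq_false_of_ne_true h
    rw [h']
    have hnil : l.filter p = [] := by
      apply List.filter_eq_nil_iff.mpr
      intro x hx hp
      exact h (List.any_eq_true.mpr ⟨x, hx, hp⟩)
    simp [hnil]

-- the conjunction form of the predicate equals A's guard chain
theorem looks_alt_eq (t : String) : looks_like_name_alt t = looks_like_name_py t := by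
  unfold looks_like_name_alt looks_like_name_py
  dsimp only
  rw [one_le_filter_eq_any]
  have hlen : PySem.Str.len t = (t.toList.length : Int) := PySem.Str.len_eq t
  by_cases hA : t = "" ∨ PySem.Str.len t < 3 ∨ PySem.Str.len t > 60
  · rw [if_pos hA]
    have h3 : ¬ (3 ≤ PySem.Str.len t) ∨ ¬ (PySem.Str.len t ≤ 60) := by
      rcases hA with h | h | h
      · left; subst h; decide
      · left; omega
      · right; omega
    rcases h3 with h | h <;> · rw [decide_eq_false h]; simp
  · rw [if_neg hA]
    push Not at hA
    have d3 : decide (3 ≤ PySem.Str.len t) = true := decide_eq_true (by omega)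
    have d60 : decide (PySem.Str.len t ≤ 60) = true := decide_eq_true (by omega)
    by_cases hw : 1 ≤ (PySem.Str.split₀ t).length ∧ (PySem.Str.split₀ t).length ≤ 5
    · rw [if_neg (not_not_intro hw)]
      have d1 : decide (1 ≤ (PySem.Str.split₀ t).length) = true := decide_eq_true hw.1
      have d5 : decide ((PySem.Str.split₀ t).length ≤ 5) = true := decide_eq_true hw.2
      by_cases hd : t.toList.any PySem.Chars.isdigit = true
      · rw [if_pos hd, hd]; simp
      · rw [if_neg hd]
        have hd' : t.toList.any PySem.Chars.isdigit = false := eq_false_of_ne_true hd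
        by_cases hs : SKIP.contains (PySem.Str.lower (PySem.Str.strip t)) = true
        · rw [if_pos hs, hs]; simp
        · rw [if_neg hs]
          have hs' := eq_false_of_ne_true hs
          rw [d3, d60, d1, d5, hd', hs']
          simp
    · rw [if_pos (by intro h; exact hw h)]
      rcases not_and_or.mp hw with h | h
      · rw [decide_eq_false h]; simp
      · rw [decide_eq_false h]; simp

-- stripping "" gives ""; facts about the strip of a concatenation (for the combined candidate)
theorem dropWhile_eq_nil_of_all (p : Char → Bool) (l : List Char)
    (h : ∀ c ∈ l, p c = true) : l.dropWhile p = [] := by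
  simp_all [List.dropWhile_eq_nil_iff]

theorem all_of_all_dropWhile (p : Char → Bool) (l : List Char)
    (h : ∀ c ∈ l.dropWhile p, p c = true) : ∀ c ∈ l, p c = true := by
  induction l with
  | nil => simp
  | cons a t ih =>
    by_cases ha : p a = true
    · intro c hc
      rcases List.mem_cons.mp hc with rfl | hc
      · exact ha
      · simp only [List.dropWhile_cons, ha, if_pos] at h
        exact ih h c hc
    · simp only [List.dropWhile_cons, ha] at h
      simpa using h

theorem all_space_of_strip_eq_nil (l : List Char)
    (h : PySem.Chars.strip l = []) : ∀ c ∈ l, PySem.Chars.isspace c = true := by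
  simp only [PySem.Chars.strip, PySem.Chars.rstrip, PySem.Chars.lstrip,
    List.reverse_eq_nil_iff, List.dropWhile_eq_nil_iff] at h
  apply all_of_all_dropWhile
  intro c hc
  exact h c (List.mem_reverse.mpr hc)

theorem exists_nonspace_of_strip_ne_nil (l : List Char)
    (h : PySem.Chars.strip l ≠ []) :
    ∃ c ∈ PySem.Chars.strip l, PySem.Chars.isspace c = false := by
  by_contra hc
  push Not at hc
  apply h
  have hall : ∀ c ∈ PySem.Chars.strip l, PySem.Chars.isspace c = true := by
    intro c hcm
    have := hc c hcm
    simpa using this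
  simp only [PySem.Chars.strip, PySem.Chars.rstrip] at hall ⊢
  rw [List.reverse_eq_nil_iff]
  apply dropWhile_eq_nil_of_all
  apply all_of_all_dropWhile
  intro c hcm
  exact hall c (List.mem_reverse.mpr hcm)

theorem strip_ne_nil_of_mem (y : List Char) (c : Char) (hc : c ∈ y)
    (hs : PySem.Chars.isspace c = false) : PySem.Chars.strip y ≠ [] := by
  intro h
  have := all_space_of_strip_eq_nil y h c hc
  simp [this] at hs

-- KEY: if first or last (both already stripped) is nonempty, so is the combined stripped string
theorem combined_ne_empty (a b : String)
    (h : PySem.Str.strip a ≠ "" ∨ PySem.Str.strip b ≠ "") :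
    PySem.Str.strip (PySem.Str.strip a ++ " " ++ PySem.Str.strip b) ≠ "" := by
  intro hz
  have hz' : PySem.Chars.strip ((PySem.Str.strip a ++ " " ++ PySem.Str.strip b)).toList = [] := by
    have := congrArg String.toList hz
    simpa [PySem.Str.toList_strip] using this
  have key : ∀ s : String, PySem.Str.strip s ≠ "" →
      ∃ c ∈ (PySem.Str.strip s).toList, PySem.Chars.isspace c = false := by
    intro s hne
    have hne' : PySem.Chars.strip s.toList ≠ [] := by
      intro hn
      apply hne
      have : (PySem.Str.strip s).toList = ([] : List Char) := by
        simpa [PySem.Str.toList_strip] using hn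
      exact String.toList_eq_nil_iff.mp this
    obtain ⟨c, hcm, hcs⟩ := exists_nonspace_of_strip_ne_nil _ hne'
    exact ⟨c, by simpa [PySem.Str.toList_strip] using hcm, hcs⟩
  rcases h with h | h
  · obtain ⟨c, hcm, hcs⟩ := key a h
    have hmem : c ∈ ((PySem.Str.strip a ++ " " ++ PySem.Str.strip b)).toList := by
      simp only [String.toList_append, List.mem_append]
      exact Or.inl (Or.inl hcm)
    exact strip_ne_nil_of_mem _ c hmem hcs hz'
  · obtain ⟨c, hcm, hcs⟩ := key b h
    have hmem : c ∈ ((PySem.Str.strip a ++ " " ++ PySem.Str.strip b)).toList := by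
      simp only [String.toList_append, List.mem_append]
      exact Or.inr hcm
    exact strip_ne_nil_of_mem _ c hmem hcs hz'

-- ===== VERDICT (by name: the statement is the Claim_ definition above) =====
theorem pick_name_py_spec : Claim_equal_pick_name_py := by
  intro item _
  unfold Spec_pick_name_py pick_name_py pick_name_py_alt
  dsimp only
  simp only [pickA_loop, pickB_loop]
  rw [collect_getD item "NAME" (by decide), collect_getD item "AGENT_NAME" (by decide),
      collect_getD item "FULL_NAME" (by decide), collect_getD item "FIRST_NAME" (by decide),
      collect_getD item "LAST_NAME" (by decide)]
  simp only [looks_alt_eq]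
  set v1 := PySem.Str.strip (getS item "NAME") with hv1
  set v2 := PySem.Str.strip (getS item "AGENT_NAME") with hv2
  set v3 := PySem.Str.strip (getS item "FULL_NAME") with hv3
  set first := PySem.Str.strip (getS item "FIRST_NAME") with hfst
  set last := PySem.Str.strip (getS item "LAST_NAME") with hlst
  by_cases hb1 : (v1 != "" && looks_like_name_py v1) = true
  · have hp1 : v1 ≠ "" ∧ looks_like_name_py v1 = true := by
      simpa [Bool.and_eq_true, bne_iff_ne] using hb1
    simp [hp1.1, hp1.2]
  · have hb1f : (v1 != "" && looks_like_name_py v1) = false := eq_false_of_ne_true hb1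
    have hp1 : ¬ (v1 ≠ "" ∧ looks_like_name_py v1 = true) := by
      simpa [Bool.and_eq_true, bne_iff_ne] using hb1
    rw [if_neg hp1, hb1f]
    simp only [Bool.false_eq_true, if_false]
    by_cases hb2 : (v2 != "" && looks_like_name_py v2) = true
    · have hp2 : v2 ≠ "" ∧ looks_like_name_py v2 = true := by
        simpa [Bool.and_eq_true, bne_iff_ne] using hb2
      simp [hp2.1, hp2.2]
    · have hb2f : (v2 != "" && looks_like_name_py v2) = false := eq_false_of_ne_true hb2
      have hp2 : ¬ (v2 ≠ "" ∧ looks_like_name_py v2 = true) := by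
        simpa [Bool.and_eq_true, bne_iff_ne] using hb2
      rw [if_neg hp2, hb2f]
      simp only [Bool.false_eq_true, if_false]
      by_cases hb3 : (v3 != "" && looks_like_name_py v3) = true
      · have hp3 : v3 ≠ "" ∧ looks_like_name_py v3 = true := by
          simpa [Bool.and_eq_true, bne_iff_ne] using hb3
        simp [hp3.1, hp3.2]
      · have hb3f : (v3 != "" && looks_like_name_py v3) = false := eq_false_of_ne_true hb3
        have hp3 : ¬ (v3 ≠ "" ∧ looks_like_name_py v3 = true) := by
          simpa [Bool.and_eq_true, bne_iff_ne] using hb3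
        rw [if_neg hp3, hb3f]
        simp only [Bool.false_eq_true, if_false]
        by_cases h4 : first ≠ "" ∨ last ≠ ""
        · have hcne : PySem.Str.strip (first ++ " " ++ last) ≠ "" := by
            rw [hfst, hlst]
            exact combined_ne_empty _ _ (by rw [← hfst, ← hlst]; exact h4)
          rw [if_pos h4]
          have ht4 : (PySem.Str.strip (first ++ " " ++ last) != "") = true := bne_iff_ne.mpr hcne
          by_cases h5 : looks_like_name_py (PySem.Str.strip (first ++ " " ++ last)) = true
          · simp [ht4, h5]
          · simp [ht4, eq_false_of_ne_true h5]
        · rw [if_neg h4]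
          push Not at h4
          have hc0 : PySem.Str.strip (first ++ " " ++ last) = "" := by
            rw [h4.1, h4.2]
            decide
          simp [hc0]
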